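-- pv_equiv track=rewrite | github.com/Imacx-maria/master-collection | SKILLS/webflow-pretreat/scripts/paste_contract_probe.py | parse_declarations
-- ===== SOURCE A (Python) =====
-- def parse_declarations(style: str) -> list[tuple[str, str, str]]:
--     out: list[tuple[str, str, str]] = []
--     for raw in style.split(";"):
--         if ":" not in raw:
--             continue
--         name, value = raw.split(":", 1)
--         name = name.strip().lower()
--         value = value.strip()
--         if name:
--             out.append((name, value, f"{name}: {value}"))
--     return out
-- ===== SOURCE B (Python) =====
-- def _flush(out, name_buf, val_buf, seen_colon):
--     # emit the declaration accumulated in the buffers, if any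
--     if seen_colon:
--         name = "".join(name_buf).strip().lower()
--         if name:
--             value = "".join(val_buf).strip()
--             out.append((name, value, f"{name}: {value}"))
--
--
-- def parse_declarations(style: str) -> list[tuple[str, str, str]]:
--     # single character-level pass: a tiny state machine over the style string
--     out: list[tuple[str, str, str]] = []
--     name_buf: list[str] = []
--     val_buf: list[str] = []
--     seen_colon = False
--     for ch in style:
--         if ch == ";":
--             _flush(out, name_buf, val_buf, seen_colon)
--             name_buf, val_buf, seen_colon = [], [], False
--         elif not seen_colon:
--             if ch == ":":
--                 seen_colon = True
--             else:
--                 name_buf.append(ch)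
--         else:
--             val_buf.append(ch)
--     _flush(out, name_buf, val_buf, seen_colon)
--     return out
-- ===== Notes on version B (the rewrite author's own statement) =====
-- stated objective: alternative
-- what changed: Replaces A's split-into-segments-then-split-each-segment-once parsing by a single character-level state-machine pass that accumulates name/value buffers and flushes them at each separator and at the end.
import Mathlib
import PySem

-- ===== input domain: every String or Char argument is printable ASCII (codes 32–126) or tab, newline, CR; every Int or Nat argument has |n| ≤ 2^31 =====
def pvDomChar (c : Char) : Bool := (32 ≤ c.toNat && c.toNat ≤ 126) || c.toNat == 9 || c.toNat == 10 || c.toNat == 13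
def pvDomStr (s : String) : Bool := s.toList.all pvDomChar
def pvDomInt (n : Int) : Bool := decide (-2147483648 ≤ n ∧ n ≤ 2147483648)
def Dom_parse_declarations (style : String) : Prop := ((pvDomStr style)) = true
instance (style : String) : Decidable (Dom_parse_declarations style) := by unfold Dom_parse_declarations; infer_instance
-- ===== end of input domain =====

-- B replaces A's split-into-segments-then-split-each-segment-once parsing by a single
-- character-level state-machine pass (alternative decomposition, same O(n) cost).

-- ===== PORT A =====
-- A's loop body: one segment 'raw' of style.split(";")
def pyParseRaw (out : List (String × String × String)) (raw : String) :
    List (String × String × String) :=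
  if PySem.Str.isIn ":" raw then
    match PySem.Str.splitMax? raw ":" 1 with
    | some (n :: v :: _) =>
        let name := PySem.Str.lower (PySem.Str.strip n)
        let value := PySem.Str.strip v
        if name ≠ "" then out ++ [(name, value, PySem.Str.join "" [name, ": ", value])] else out
    | _ => out          -- unreachable: ':' is in raw, so split(':', 1) yields two pieces
  else out

def parse_declarations (style : String) : List (String × String × String) :=
  match PySem.Str.split? style ";" with
  | some raws => raws.foldl pyParseRaw []
  | none => []          -- unreachable: the separator ";" is not empty

-- ===== PORT B =====
-- Source B's _flush: emit the declaration accumulated in the buffers, if any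
def pdFlush (out : List (String × String × String)) (nameBuf valBuf : List Char)
    (seenColon : Bool) : List (String × String × String) :=
  if seenColon then
    let name := PySem.Chars.lower (PySem.Chars.strip nameBuf)
    if name ≠ [] then
      let value := PySem.Chars.strip valBuf
      out ++ [(String.ofList name, String.ofList value,
               String.ofList (name ++ ':' :: ' ' :: value))]
    else out
  else out

-- Source B's loop body: one character of the style string
def pdStep (st : List (String × String × String) × List Char × List Char × Bool) (ch : Char) :
    List (String × String × String) × List Char × List Char × Bool :=
  match st with
  | (out, nbuf, vbuf, sc) =>
    if ch = ';' then (pdFlush out nbuf vbuf sc, [], [], false)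
    else if !sc then
      if ch = ':' then (out, nbuf, vbuf, true)
      else (out, nbuf ++ [ch], vbuf, false)
    else (out, nbuf, vbuf ++ [ch], true)

def parse_declarations_alt (style : String) : List (String × String × String) :=
  match style.toList.foldl pdStep ([], [], [], false) with
  | (out, nbuf, vbuf, sc) => pdFlush out nbuf vbuf sc

-- ===== PRECONDITION & SPEC =====
def Spec_parse_declarations (style : String) (out : List (String × String × String)) : Prop :=
  out = parse_declarations_alt style
instance (style : String) (out : List (String × String × String)) :
    Decidable (Spec_parse_declarations style out) := by unfold Spec_parse_declarations; infer_instance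

-- ===== CLAIM (what is proved, stated in full; the proofs are below) =====
def Claim_equal_parse_declarations : Prop :=
  ∀ (style : String), Dom_parse_declarations style →
    Spec_parse_declarations style (parse_declarations style)

-- ===== LEMMAS AND PROOFS =====

-- the segments of cs split on ';' : (first segment, remaining segments)
def pvSplit : List Char → List Char × List (List Char)
  | [] => ([], [])
  | c :: rest =>
      let p := pvSplit rest
      if c = ';' then ([], p.1 :: p.2) else (c :: p.1, p.2)

-- split a segment at its first ':' (none if there is no ':')
def pvSplitFirst : List Char → Option (List Char × List Char)
  | [] => none
  | c :: rest =>
      if c = ':' then some ([], rest)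
      else (pvSplitFirst rest).map (fun p => (c :: p.1, p.2))

-- process a whole segment from a given scanner state, then flush
def pvScanFlush (out : List (String × String × String)) (n v : List Char) (sc : Bool)
    (seg : List Char) : List (String × String × String) :=
  match seg.foldl pdStep (out, n, v, sc) with
  | (o, n', v', sc') => pdFlush o n' v' sc'

theorem pvSplitOn_go_spec (fuel : Nat) (cs cur : List Char) (acc : List (List Char))
    (h : cs.length < fuel) :
    PySem.Chars.splitOn.go [';'] fuel cs cur acc =
      acc.reverse ++ (cur.reverse ++ (pvSplit cs).1) :: (pvSplit cs).2 := by
  induction fuel generalizing cs cur acc with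
  | zero => omega
  | succ fuel ih =>
    cases cs with
    | nil =>
      rw [show PySem.Chars.splitOn.go [';'] (fuel+1) [] cur acc
            = (cur.reverse :: acc).reverse from rfl]
      simp [pvSplit]
    | cons c rest =>
      simp only [List.length_cons] at h
      rw [show PySem.Chars.splitOn.go [';'] (fuel+1) (c :: rest) cur acc
            = if [';'].isPrefixOf (c :: rest) = true then
                PySem.Chars.splitOn.go [';'] fuel (List.drop 1 (c :: rest)) [] (cur.reverse :: acc)
              else PySem.Chars.splitOn.go [';'] fuel rest (c :: cur) acc from rfl]
      by_cases hc : c = ';'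
      · subst hc
        rw [if_pos (by simp [List.isPrefixOf])]
        rw [List.drop_one, List.tail_cons, ih rest [] (cur.reverse :: acc) (by omega)]
        simp [pvSplit]
      · rw [if_neg (by simp [List.isPrefixOf]; exact fun h' => hc h'.symm)]
        rw [ih rest (c :: cur) acc (by omega)]
        simp [pvSplit, hc]

theorem pvSplitOnMax_go_zero (fuel : Nat) (cs cur : List Char) (acc : List (List Char)) :
    PySem.Chars.splitOnMax.go [':'] fuel 0 cs cur acc = acc.reverse ++ [cur.reverse ++ cs] := by
  cases fuel with
  | zero => rw [show PySem.Chars.splitOnMax.go [':'] 0 0 cs cur acc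
      = ((cur.reverse ++ cs) :: acc).reverse from rfl]; simp
  | succ fuel =>
    cases cs with
    | nil => rw [show PySem.Chars.splitOnMax.go [':'] (fuel+1) 0 [] cur acc
        = (cur.reverse :: acc).reverse from rfl]; simp
    | cons c rest =>
      rw [show PySem.Chars.splitOnMax.go [':'] (fuel+1) 0 (c :: rest) cur acc
        = ((cur.reverse ++ (c :: rest)) :: acc).reverse from rfl]; simp

theorem pvSplitOnMax_go_one (fuel : Nat) (cs cur : List Char) (acc : List (List Char))
    (h : cs.length < fuel) :
    PySem.Chars.splitOnMax.go [':'] fuel 1 cs cur acc =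
      match pvSplitFirst cs with
      | some (a, b) => acc.reverse ++ [cur.reverse ++ a, b]
      | none => acc.reverse ++ [cur.reverse ++ cs] := by
  induction fuel generalizing cs cur acc with
  | zero => omega
  | succ fuel ih =>
    cases cs with
    | nil =>
      rw [show PySem.Chars.splitOnMax.go [':'] (fuel+1) 1 [] cur acc
        = (cur.reverse :: acc).reverse from rfl]
      simp [pvSplitFirst]
    | cons c rest =>
      simp only [List.length_cons] at h
      rw [show PySem.Chars.splitOnMax.go [':'] (fuel+1) 1 (c :: rest) cur acc
            = if [':'].isPrefixOf (c :: rest) = true then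
                PySem.Chars.splitOnMax.go [':'] fuel 0 (List.drop 1 (c :: rest)) [] (cur.reverse :: acc)
              else PySem.Chars.splitOnMax.go [':'] fuel 1 rest (c :: cur) acc from rfl]
      by_cases hc : c = ':'
      · subst hc
        rw [if_pos (by simp [List.isPrefixOf])]
        rw [List.drop_one, List.tail_cons, pvSplitOnMax_go_zero]
        simp [pvSplitFirst]
      · rw [if_neg (by simp [List.isPrefixOf]; exact fun h' => hc h'.symm)]
        rw [ih rest (c :: cur) acc (by omega)]
        simp only [pvSplitFirst, if_neg hc]
        cases hsf : pvSplitFirst rest with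
        | none => simp
        | some p => cases p; simp

theorem pvColon_mem_iff (cs : List Char) : ':' ∈ cs ↔ (pvSplitFirst cs).isSome = true := by
  induction cs with
  | nil => simp [pvSplitFirst]
  | cons c rest ih =>
    by_cases hc : c = ':'
    · subst hc; simp [pvSplitFirst]
    · simp [pvSplitFirst, hc, ih]; exact fun h => absurd h.symm hc

theorem pvSplit_no_semi (cs : List Char) :
    ';' ∉ (pvSplit cs).1 ∧ ∀ seg ∈ (pvSplit cs).2, ';' ∉ seg := by
  induction cs with
  | nil => simp [pvSplit]
  | cons c rest ih =>
    by_cases hc : c = ';'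
    · subst hc
      simp only [pvSplit, if_pos rfl]
      refine ⟨by simp, ?_⟩
      intro seg hseg
      rcases List.mem_cons.mp hseg with h | h
      · subst h; exact ih.1
      · exact ih.2 seg h
    · simp only [pvSplit, if_neg hc]
      refine ⟨?_, ih.2⟩
      intro hmem
      rcases List.mem_cons.mp hmem with h | h
      · exact hc h.symm
      · exact ih.1 h

theorem pvScan_true (seg : List Char) (out : List (String × String × String)) (n v : List Char)
    (h : ';' ∉ seg) :
    seg.foldl pdStep (out, n, v, true) = (out, n, v ++ seg, true) := by
  induction seg generalizing v with
  | nil => simp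
  | cons c rest ih =>
    have hc : ¬ c = ';' := fun hh => h (hh ▸ List.mem_cons_self)
    rw [List.foldl_cons]
    rw [show pdStep (out, n, v, true) c = (out, n, v ++ [c], true) by
      simp [pdStep, hc]]
    rw [ih (v ++ [c]) (fun hm => h (List.mem_cons_of_mem _ hm))]
    simp

theorem pvScan_false (seg : List Char) (out : List (String × String × String)) (n v : List Char)
    (h : ';' ∉ seg) :
    seg.foldl pdStep (out, n, v, false) =
      match pvSplitFirst seg with
      | none => (out, n ++ seg, v, false)
      | some (a, b) => (out, n ++ a, v ++ b, true) := by
  induction seg generalizing n with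
  | nil => simp [pvSplitFirst]
  | cons c rest ih =>
    have hc : ¬ c = ';' := fun hh => h (hh ▸ List.mem_cons_self)
    have hrest : ';' ∉ rest := fun hm => h (List.mem_cons_of_mem _ hm)
    rw [List.foldl_cons]
    by_cases hcol : c = ':'
    · subst hcol
      rw [show pdStep (out, n, v, false) ':' = (out, n, v, true) by simp [pdStep, hc]]
      rw [pvScan_true rest out n v hrest]
      simp [pvSplitFirst]
    · rw [show pdStep (out, n, v, false) c = (out, n ++ [c], v, false) by
        simp [pdStep, hc, hcol]]
      rw [ih (n ++ [c]) hrest]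
      simp only [pvSplitFirst, if_neg hcol]
      cases hsf : pvSplitFirst rest with
      | none => simp
      | some p => cases p; simp

theorem pvSeg_eq (out : List (String × String × String)) (seg : List Char) (h : ';' ∉ seg) :
    pyParseRaw out (String.ofList seg) = pvScanFlush out [] [] false seg := by
  rw [pvScanFlush, pvScan_false seg out [] [] h]
  cases hsf : pvSplitFirst seg with
  | none =>
    have hnc : ':' ∉ seg := by
      rw [pvColon_mem_iff, hsf]; simp
    have hisin : PySem.Chars.isIn [':'] seg = false := by
      rw [PySem.Chars.isIn_eq_false_iff]
      intro hinf
      exact hnc (by simpa [List.singleton_infix_iff] using hinf)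
    simp [pyParseRaw, PySem.Str.isIn_eq, hisin, pdFlush]
  | some p =>
    rcases p with ⟨a, b⟩
    have hc : ':' ∈ seg := by rw [pvColon_mem_iff, hsf]; simp
    have hisin : PySem.Str.isIn ":" (String.ofList seg) = true := by
      simp only [PySem.Str.isIn_eq]
      rw [PySem.Chars.isIn_iff_infix]
      simpa [List.singleton_infix_iff] using hc
    have hmax : PySem.Str.splitMax? (String.ofList seg) ":" 1
        = some [String.ofList a, String.ofList b] := by
      simp only [PySem.Str.splitMax?]
      rw [show (String.ofList seg).toList = seg by simp]
      rw [show (":".toList) = [':'] from rfl]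
      rw [show PySem.Chars.splitMax? seg [':'] 1
          = some (PySem.Chars.splitOnMax seg [':'] 1) by simp [PySem.Chars.splitMax?]]
      rw [show PySem.Chars.splitOnMax seg [':'] 1
          = PySem.Chars.splitOnMax.go [':'] (seg.length + 1) 1 seg [] [] by
        simp [PySem.Chars.splitOnMax]]
      rw [pvSplitOnMax_go_one (seg.length + 1) seg [] [] (by omega)]
      simp [hsf]
    have hname : PySem.Str.lower (PySem.Str.strip (String.ofList a))
        = String.ofList (PySem.Chars.lower (PySem.Chars.strip a)) := by
      apply String.toList_inj.mp
      simp
    have hval : PySem.Str.strip (String.ofList b)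
        = String.ofList (PySem.Chars.strip b) := by
      apply String.toList_inj.mp
      simp
    have hjoin : PySem.Str.join "" [String.ofList (PySem.Chars.lower (PySem.Chars.strip a)), ": ",
          String.ofList (PySem.Chars.strip b)]
        = String.ofList (PySem.Chars.lower (PySem.Chars.strip a)
            ++ ':' :: ' ' :: PySem.Chars.strip b) := by
      apply String.toList_inj.mp
      rw [PySem.Str.toList_join]
      simp [PySem.Chars.join, List.intercalate,
        show (": ".toList) = [':', ' '] from rfl, show ("".toList) = ([] : List Char) from rfl]
    simp only [pyParseRaw, hisin, if_true, hmax, hname, hval, hjoin, List.nil_append]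
    by_cases hne : PySem.Chars.lower (PySem.Chars.strip a) = []
    · simp [pdFlush, hne, String.ofList_eq_empty_iff]
    · simp [pdFlush, hne, String.ofList_eq_empty_iff]

theorem pvMain (cs : List Char) (out : List (String × String × String)) (n v : List Char)
    (sc : Bool) :
    (match cs.foldl pdStep (out, n, v, sc) with
     | (o, n', v', sc') => pdFlush o n' v' sc') =
      (pvSplit cs).2.foldl (fun o seg => pvScanFlush o [] [] false seg)
        (pvScanFlush out n v sc (pvSplit cs).1) := by
  induction cs generalizing out n v sc with
  | nil => simp [pvSplit, pvScanFlush]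
  | cons c rest ih =>
    rw [List.foldl_cons]
    by_cases hc : c = ';'
    · subst hc
      rw [show pdStep (out, n, v, sc) ';' = (pdFlush out n v sc, [], [], false) by
        simp [pdStep]]
      rw [ih]
      simp [pvSplit, pvScanFlush]
    · rcases hst : pdStep (out, n, v, sc) c with ⟨o', rest'⟩
      rcases rest' with ⟨n', rest''⟩
      rcases rest'' with ⟨v', sc'⟩
      rw [ih]
      have hseg : pvScanFlush out n v sc ((pvSplit (c :: rest)).1)
          = pvScanFlush o' n' v' sc' ((pvSplit rest).1) := by
        simp only [pvSplit, if_neg hc]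
        simp only [pvScanFlush, List.foldl_cons, hst]
      simp only [pvSplit, if_neg hc]
      rw [← hseg]
      simp only [pvSplit, if_neg hc]

-- ===== VERDICT (by name: the statement is the Claim_ definition above) =====
theorem parse_declarations_spec : Claim_equal_parse_declarations := by
  intro style _
  unfold Spec_parse_declarations
  have hsplit : PySem.Str.split? style ";"
      = some (((pvSplit style.toList).1 :: (pvSplit style.toList).2).map String.ofList) := by
    simp only [PySem.Str.split?]
    rw [show (";".toList) = [';'] from rfl]
    rw [show PySem.Chars.split? style.toList [';']
        = some (PySem.Chars.splitOn style.toList [';']) by simp [PySem.Chars.split?]]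
    rw [show PySem.Chars.splitOn style.toList [';']
        = PySem.Chars.splitOn.go [';'] (style.toList.length + 1) style.toList [] [] by
      simp [PySem.Chars.splitOn]]
    rw [pvSplitOn_go_spec (style.toList.length + 1) style.toList [] [] (by omega)]
    simp
  rw [show parse_declarations style
      = (((pvSplit style.toList).1 :: (pvSplit style.toList).2).map String.ofList).foldl
          pyParseRaw [] by
    rw [parse_declarations, hsplit]]
  rw [parse_declarations_alt, pvMain style.toList [] [] [] false]
  rw [List.map_cons, List.foldl_cons, List.foldl_map]
  rw [pvSeg_eq [] (pvSplit style.toList).1 (pvSplit_no_semi style.toList).1]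
  exact PySem.List.foldl_congr_mem _ _ _ _
    (fun acc seg hmem => pvSeg_eq acc seg ((pvSplit_no_semi style.toList).2 seg hmem))
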